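-- pv_equiv track=rewrite | github.com/maldata/advent-of-code | 2021/21/solutions.py | get_all_quantum_rolls
-- ===== SOURCE A (Python) =====
-- def get_all_quantum_rolls(die_faces, num_rolls):
--     if num_rolls == 1:
--         return [[i] for i in range(1, die_faces + 1)]
--
--     agg = []
--     for i in get_all_quantum_rolls(die_faces, num_rolls - 1):
--         for j in range(1, die_faces + 1):
--             aug = i[:]
--             aug.append(j)
--             agg.append(aug)
--     return agg
-- ===== SOURCE B (Python) =====
-- def get_all_quantum_rolls(die_faces, num_rolls):
--     result = [[]]
--     for _ in range(num_rolls):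
--         result = [prefix + [j] for prefix in result for j in range(1, die_faces + 1)]
--     return result
-- ===== Notes on version B (the rewrite author's own statement) =====
-- stated objective: simpler
-- what changed: Replaced the recursion (base case at num_rolls==1 plus nested append loops) by a single iterative accumulator starting at [[]] that is rebuilt num_rolls times with a flat comprehension, preserving order (prefix outer, face inner).
import Mathlib
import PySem

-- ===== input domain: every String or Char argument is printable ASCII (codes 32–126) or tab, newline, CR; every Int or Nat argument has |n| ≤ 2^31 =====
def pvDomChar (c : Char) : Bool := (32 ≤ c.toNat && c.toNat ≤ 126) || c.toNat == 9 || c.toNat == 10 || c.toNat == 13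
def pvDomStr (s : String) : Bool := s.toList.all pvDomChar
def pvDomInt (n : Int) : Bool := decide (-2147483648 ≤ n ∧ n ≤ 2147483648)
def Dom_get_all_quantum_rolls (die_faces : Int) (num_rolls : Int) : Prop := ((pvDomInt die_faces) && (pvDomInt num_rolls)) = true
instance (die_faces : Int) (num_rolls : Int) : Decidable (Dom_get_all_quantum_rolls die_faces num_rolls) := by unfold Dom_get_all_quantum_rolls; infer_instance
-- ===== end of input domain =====

-- B replaces A's recursion by a single iterative accumulator rebuilt num_rolls times (simpler); A = B is proved for num_rolls ≥ 1.

-- ===== PORT A =====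
-- literal port of A's recursion; the 'num_rolls ≤ 1' guard only makes the recursion
-- total in Lean (Python A recurses forever for num_rolls < 1, excluded by Pre_)
def get_all_quantum_rolls (die_faces : Int) (num_rolls : Int) : List (List Int) :=
  if num_rolls ≤ 1 then
    (PySem.List.pyRange 1 (die_faces + 1) 1).map (fun i => [i])
  else
    (get_all_quantum_rolls die_faces (num_rolls - 1)).foldl
      (fun agg i =>
        (PySem.List.pyRange 1 (die_faces + 1) 1).foldl
          (fun agg j => agg ++ [i ++ [j]]) agg) []
termination_by num_rolls.toNat
decreasing_by omega

-- ===== PORT B =====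
def get_all_quantum_rolls_alt (die_faces : Int) (num_rolls : Int) : List (List Int) :=
  (List.range num_rolls.toNat).foldl
    (fun result _ =>
      result.flatMap (fun pre =>
        (PySem.List.pyRange 1 (die_faces + 1) 1).map (fun j => pre ++ [j])))
    [[]]

-- ===== PRECONDITION & SPEC =====
-- Pre_ excludes num_rolls < 1, where Python A recurses without a base case and raises RecursionError.
def Pre_get_all_quantum_rolls (die_faces : Int) (num_rolls : Int) : Prop := 1 ≤ num_rolls
instance (die_faces : Int) (num_rolls : Int) : Decidable (Pre_get_all_quantum_rolls die_faces num_rolls) := by unfold Pre_get_all_quantum_rolls; infer_instance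
def pvWitness_get_all_quantum_rolls : Int × Int := (3, 2)

def Spec_get_all_quantum_rolls (die_faces : Int) (num_rolls : Int) (out : List (List Int)) : Prop := out = get_all_quantum_rolls_alt die_faces num_rolls
instance (die_faces : Int) (num_rolls : Int) (out : List (List Int)) : Decidable (Spec_get_all_quantum_rolls die_faces num_rolls out) := by unfold Spec_get_all_quantum_rolls; infer_instance

-- ===== CLAIM (what is proved, stated in full; the proofs are below) =====
def Claim_equal_get_all_quantum_rolls : Prop := ∀ (die_faces : Int) (num_rolls : Int), Dom_get_all_quantum_rolls die_faces num_rolls → Pre_get_all_quantum_rolls die_faces num_rolls → Spec_get_all_quantum_rolls die_faces num_rolls (get_all_quantum_rolls die_faces num_rolls)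

-- ===== LEMMAS AND PROOFS =====

-- A's nested append loops compute one flatMap step
lemma A_step (faces : List Int) (L acc : List (List Int)) :
    L.foldl (fun agg i => faces.foldl (fun agg j => agg ++ [i ++ [j]]) agg) acc
      = acc ++ L.flatMap (fun i => faces.map (fun j => i ++ [j])) := by
  induction L generalizing acc with
  | nil => simp
  | cons x xs ih =>
    rw [List.foldl_cons, PySem.List.foldl_append_singleton_eq_map, ih, List.append_assoc,
      List.flatMap_cons]

-- the two ports agree at num_rolls = n+1, by induction on n
lemma main_nat (die_faces : Int) (n : Nat) :
    get_all_quantum_rolls die_faces ((n : Int) + 1)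
      = get_all_quantum_rolls_alt die_faces ((n : Int) + 1) := by
  induction n with
  | zero =>
    rw [get_all_quantum_rolls]
    simp [get_all_quantum_rolls_alt]
  | succ k ih =>
    rw [get_all_quantum_rolls]
    push_cast
    rw [if_neg (by omega : ¬ ((k : Int) + 1 + 1 ≤ 1))]
    have h2 : (k : Int) + 1 + 1 - 1 = (k : Int) + 1 := by ring
    rw [h2, A_step, ih]
    have h3 : (((k : Int) + 1 + 1).toNat) = k + 2 := by omega
    have h4 : (((k : Int) + 1).toNat) = k + 1 := by omega
    simp only [get_all_quantum_rolls_alt, h3, h4, List.range_succ, List.foldl_append,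
      List.foldl_cons, List.foldl_nil, List.nil_append]

-- ===== VERDICT (by name: the statement is the Claim_ definition above) =====
theorem get_all_quantum_rolls_spec : Claim_equal_get_all_quantum_rolls := by
  intro die_faces num_rolls _ hpre
  unfold Spec_get_all_quantum_rolls
  have h : num_rolls = ((num_rolls - 1).toNat : Int) + 1 := by
    unfold Pre_get_all_quantum_rolls at hpre; omega
  rw [h]
  exact main_nat die_faces (num_rolls - 1).toNat
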